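-- pv_equiv track=rewrite | github.com/althafalimohommad/email-triage-env | server/email_triage_env_environment.py | _is_partially_correct
-- ===== SOURCE A (Python) =====
-- def _is_partially_correct(predicted: str, actual: str) -> bool:
--     """Check if a prediction is in a similar neighborhood as the truth."""
--     similar_groups = [
--         {"urgent", "follow_up"},  # Both need attention
--         {"fyi", "meeting"},       # Both informational
--         {"spam"},                 # Spam is unique
--         {"approval"},             # Approval is unique
--     ]
--     for group in similar_groups:
--         if predicted in group and actual in group:
--             return True
--     return False
-- ===== SOURCE B (Python) =====
-- # B: no group structure at all — two labels are "similar" iff they are the same known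
-- # label, or the unordered pair is one of the two cross-label pairs.
-- _KNOWN = ("urgent", "follow_up", "fyi", "meeting", "spam", "approval")
-- _CROSS_PAIRS = (frozenset(("urgent", "follow_up")), frozenset(("fyi", "meeting")))
--
-- def _is_partially_correct(predicted: str, actual: str) -> bool:
--     if predicted == actual:
--         return predicted in _KNOWN
--     return frozenset((predicted, actual)) in _CROSS_PAIRS
-- ===== Notes on version B (the rewrite author's own statement) =====
-- stated objective: simpler
-- what changed: Drops the group data structure entirely: B decides via an equality test (equal known labels) plus a check whether the unordered pair is one of the two cross-group pairs, instead of scanning groups for joint membership.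
import Mathlib
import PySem

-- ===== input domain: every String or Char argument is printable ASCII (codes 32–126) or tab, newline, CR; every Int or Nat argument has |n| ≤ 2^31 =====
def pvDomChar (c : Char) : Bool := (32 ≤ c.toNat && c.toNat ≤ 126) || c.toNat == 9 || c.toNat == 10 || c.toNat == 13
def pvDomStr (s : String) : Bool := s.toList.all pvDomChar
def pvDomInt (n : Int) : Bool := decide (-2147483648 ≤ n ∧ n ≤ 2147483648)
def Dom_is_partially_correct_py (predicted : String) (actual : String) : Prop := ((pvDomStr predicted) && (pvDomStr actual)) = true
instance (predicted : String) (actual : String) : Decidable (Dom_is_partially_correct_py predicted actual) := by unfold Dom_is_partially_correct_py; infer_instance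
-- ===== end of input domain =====

-- B drops the group structure: equal known labels, or the unordered pair is one of the
-- two cross-group pairs — simpler than A's scan of a list of sets, same result.

-- ===== PORT A =====
def pvGroupsA : List (PySem.Set String) :=
  [PySem.Set.ofList ["urgent", "follow_up"],
   PySem.Set.ofList ["fyi", "meeting"],
   PySem.Set.ofList ["spam"],
   PySem.Set.ofList ["approval"]]

def pvLoopA (predicted actual : String) : List (PySem.Set String) → Bool
  | [] => false
  | g :: rest =>
    if g.contains predicted && g.contains actual then true
    else pvLoopA predicted actual rest

def is_partially_correct_py (predicted : String) (actual : String) : Bool :=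
  pvLoopA predicted actual pvGroupsA

-- ===== PORT B =====
def pvKnown : List String := ["urgent", "follow_up", "fyi", "meeting", "spam", "approval"]

-- frozenset((p, a)) == frozenset(pair) is ported as unordered-pair equality (exact for two-element frozensets).
def pvPairEq (p a x y : String) : Bool :=
  (p = x && a = y) || (p = y && a = x)

def is_partially_correct_py_alt (predicted : String) (actual : String) : Bool :=
  if predicted = actual then pvKnown.contains predicted
  else pvPairEq predicted actual "urgent" "follow_up" || pvPairEq predicted actual "fyi" "meeting"

-- ===== PRECONDITION & SPEC =====
def Spec_is_partially_correct_py (predicted : String) (actual : String) (out : Bool) : Prop := out = is_partially_correct_py_alt predicted actual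
instance (predicted : String) (actual : String) (out : Bool) : Decidable (Spec_is_partially_correct_py predicted actual out) := by unfold Spec_is_partially_correct_py; infer_instance

-- ===== CLAIM (what is proved, stated in full; the proofs are below) =====
def Claim_equal_is_partially_correct_py : Prop := ∀ (predicted : String) (actual : String), Dom_is_partially_correct_py predicted actual → Spec_is_partially_correct_py predicted actual (is_partially_correct_py predicted actual)

-- ===== LEMMAS AND PROOFS =====

-- ===== VERDICT (by name: the statement is the Claim_ definition above) =====
set_option maxHeartbeats 2000000 in
theorem is_partially_correct_py_spec : Claim_equal_is_partially_correct_py := by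
  intro p a _
  unfold Spec_is_partially_correct_py is_partially_correct_py is_partially_correct_py_alt
  have hg : pvGroupsA = [["urgent", "follow_up"], ["fyi", "meeting"], ["spam"], ["approval"]] := by
    decide
  rw [hg]
  simp only [pvLoopA, PySem.Set.contains_eq_listContains, pvKnown, pvPairEq]
  simp only [List.contains_cons, List.contains_nil, Bool.or_false]
  split_ifs <;> simp_all
  all_goals
    first
      | tauto
      | (obtain ⟨hp | hp, ha | ha⟩ := ‹(_ ∨ _) ∧ (_ ∨ _)› <;> subst_vars <;> simp_all)
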